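-- pv_equiv track=rewrite | github.com/xs-web-lyq/LeetCode | Python/1856. 子数组最小乘积的最大值.py | maxSumMinProduct
-- ===== SOURCE A (Python) =====
-- from typing import List
--
-- def maxSumMinProduct(nums: List[int]) -> int:
--     s = []
--     l = [-1]*len(nums)
--     r = [len(nums)]*len(nums)
--     pre = [0]
--     for item in nums:
--         p = pre[-1] + item
--         pre.append(p)
--     for i in range(len(nums)):
--         while s and nums[i] <= nums[s[-1]]:
--             r[s[-1]] = i
--             s.pop()
--         if s :l[i] = s[-1]
--         s.append(i)
--     res = 0
--     for i in range(len(nums)):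
--         res = max(res, nums[i] * (pre[r[i]] - pre[l[i] + 1]))
--     return res % (10**9 + 7)
-- ===== SOURCE B (Python) =====
-- from typing import List
--
-- def maxSumMinProduct(nums: List[int]) -> int:
--     n = len(nums)
--     pre = [sum(nums[:i]) for i in range(n + 1)]
--     res = 0
--     for i in range(n):
--         v = nums[i]
--         l = i - 1
--         while l >= 0 and nums[l] >= v:
--             l -= 1
--         r = i + 1
--         while r < n and nums[r] > v:
--             r += 1
--         res = max(res, v * (pre[r] - pre[l + 1]))
--     return res % (10 ** 9 + 7)
-- ===== Notes on version B (the rewrite author's own statement) =====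
-- stated objective: alternative
-- what changed: Replaces the monotonic-stack computation of each element's nearest-smaller boundaries (three passes filling l[] and r[] arrays) with direct per-index left/right linear scans and a prefix array built by slice sums, trading the stack bookkeeping for brute-force scans of the same boundaries.
import Mathlib
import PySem

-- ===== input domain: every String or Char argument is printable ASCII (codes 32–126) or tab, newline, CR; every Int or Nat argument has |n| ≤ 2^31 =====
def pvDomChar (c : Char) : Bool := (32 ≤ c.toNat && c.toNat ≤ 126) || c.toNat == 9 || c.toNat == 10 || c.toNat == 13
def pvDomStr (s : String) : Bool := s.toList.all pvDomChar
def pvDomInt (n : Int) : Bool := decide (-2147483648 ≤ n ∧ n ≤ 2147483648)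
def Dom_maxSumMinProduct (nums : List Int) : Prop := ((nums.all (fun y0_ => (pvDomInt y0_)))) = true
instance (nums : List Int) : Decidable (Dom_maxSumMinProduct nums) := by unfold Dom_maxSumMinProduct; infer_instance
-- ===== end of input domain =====

-- B replaces A's three-pass monotonic-stack boundary computation by direct per-index
-- left/right linear scans (alternative decomposition, not faster).

-- ===== PORT A =====
-- xs[i] for an index that is always in range in both programs (getD 0 is never reached)
def pvIdx (xs : List Int) (i : Int) : Int := (PySem.List.pyGet? xs i).getD 0

-- pre = [0]; for item in nums: pre.append(pre[-1] + item)
def preA (nums : List Int) : List Int :=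
  nums.foldl (fun pre item => pre ++ [pvIdx pre (-1) + item]) [0]

-- while s and nums[i] <= nums[s[-1]]: r[s[-1]] = i; s.pop()   (stack head = Python s[-1])
def popA (nums : List Int) (i : Nat) : List Nat → List Int → List Nat × List Int
  | [], r => ([], r)
  | t :: s, r =>
    if pvIdx nums (i : Int) ≤ pvIdx nums (t : Int) then popA nums i s (r.set t (i : Int))
    else (t :: s, r)

-- one iteration of A's second loop, state (s, l, r)
def stepA (nums : List Int) (st : List Nat × List Int × List Int) (i : Nat) :
    List Nat × List Int × List Int :=
  let p := popA nums i st.1 st.2.2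
  let l' := match p.1 with
    | [] => st.2.1
    | t :: _ => st.2.1.set i (t : Int)
  (i :: p.1, l', p.2)

def maxSumMinProduct (nums : List Int) : Int :=
  let n := nums.length
  let pre := preA nums
  let st := (List.range n).foldl (stepA nums)
    ([], List.replicate n (-1), List.replicate n (n : Int))
  let res := (List.range n).foldl (fun res (i : Nat) =>
    max res (pvIdx nums (i : Int) *
      (pvIdx pre (pvIdx st.2.2 (i : Int)) - pvIdx pre (pvIdx st.2.1 (i : Int) + 1)))) 0
  PySem.Int.mod res (10 ^ 9 + 7)

-- ===== PORT B =====
-- l = i - 1; while l >= 0 and nums[l] >= v: l -= 1   (argument = current l + 1)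
def scanL (nums : List Int) (v : Int) : Nat → Int
  | 0 => -1
  | k + 1 => if v ≤ pvIdx nums (k : Int) then scanL nums v k else (k : Int)

-- r = i + 1; while r < n and nums[r] > v: r += 1   (fuel = n - r)
def scanR (nums : List Int) (v : Int) : Nat → Nat → Nat
  | r, 0 => r
  | r, fuel + 1 => if v < pvIdx nums (r : Int) then scanR nums v (r + 1) fuel else r

def maxSumMinProduct_alt (nums : List Int) : Int :=
  let n := nums.length
  let pre := (List.range (n + 1)).map (fun (i : Nat) => (PySem.List.slice nums none (some (i : Int))).sum)
  let res := (List.range n).foldl (fun res (i : Nat) =>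
    let v := pvIdx nums (i : Int)
    let l := scanL nums v i
    let r := scanR nums v (i + 1) (n - (i + 1))
    max res (v * (pvIdx pre (r : Int) - pvIdx pre (l + 1)))) 0
  PySem.Int.mod res (10 ^ 9 + 7)

-- ===== PRECONDITION & SPEC =====
def Spec_maxSumMinProduct (nums : List Int) (out : Int) : Prop := out = maxSumMinProduct_alt nums
instance (nums : List Int) (out : Int) : Decidable (Spec_maxSumMinProduct nums out) := by
  unfold Spec_maxSumMinProduct; infer_instance

-- ===== CLAIM (what is proved, stated in full; the proofs are below) =====
def Claim_equal_maxSumMinProduct : Prop := ∀ (nums : List Int), Dom_maxSumMinProduct nums → Spec_maxSumMinProduct nums (maxSumMinProduct nums)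

-- ===== LEMMAS AND PROOFS =====

-- nums[j] for a Nat index
def pvG (nums : List Int) (j : Nat) : Int := pvIdx nums (j : Int)

-- "j is visible at step i": j < i and nothing in (j, i) is ≤ nums[j]
def Vis (nums : List Int) (i j : Nat) : Prop :=
  j < i ∧ ∀ k, j < k → k < i → pvG nums j < pvG nums k

-- B's right boundary for index j
def specR (nums : List Int) (j : Nat) : Nat :=
  scanR nums (pvG nums j) (j + 1) (nums.length - (j + 1))

-- the loop invariant of A's second loop
def InvA (nums : List Int) (i : Nat) (st : List Nat × List Int × List Int) : Prop :=
  st.1.Pairwise (· > ·) ∧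
  (∀ j, j ∈ st.1 ↔ Vis nums i j) ∧
  st.2.1.length = nums.length ∧ st.2.2.length = nums.length ∧
  (∀ j, j < nums.length →
    st.2.1.getD j 0 = if j < i then scanL nums (pvG nums j) j else -1) ∧
  (∀ j, j < nums.length →
    st.2.2.getD j 0 = if specR nums j < i then (specR nums j : Int) else (nums.length : Int))

theorem scanL_none (nums : List Int) (v : Int) :
    ∀ k, (∀ j, j < k → v ≤ pvG nums j) → scanL nums v k = -1 := by
  intro k
  induction k with
  | zero => intro _; rfl
  | succ k ih =>
    intro h
    have hk : v ≤ pvG nums k := h k (Nat.lt_succ_self k)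
    simp only [scanL, pvG] at hk ⊢
    rw [if_pos hk]
    exact ih (fun j hj => h j (Nat.lt_succ_of_lt hj))

theorem scanL_first (nums : List Int) (v : Int) :
    ∀ k u, u < k → pvG nums u < v → (∀ j, u < j → j < k → v ≤ pvG nums j) →
      scanL nums v k = (u : Int) := by
  intro k
  induction k with
  | zero => intro u hu; omega
  | succ k ih =>
    intro u hu hlt hmid
    rcases Nat.lt_or_ge u k with h | h
    · have hk : v ≤ pvG nums k := hmid k h (Nat.lt_succ_self k)
      simp only [scanL, pvG] at hk ⊢
      rw [if_pos hk]
      exact ih u h hlt (fun j hj1 hj2 => hmid j hj1 (Nat.lt_succ_of_lt hj2))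
    · have huk : u = k := by omega
      subst huk
      simp only [scanL, pvG] at hlt ⊢
      rw [if_neg (not_le.mpr hlt)]

theorem scanR_le (nums : List Int) (v : Int) :
    ∀ fuel a, scanR nums v a fuel ≤ a + fuel := by
  intro fuel
  induction fuel with
  | zero => intro a; simp [scanR]
  | succ fuel ih =>
    intro a
    simp only [scanR]
    split
    · have := ih (a + 1); omega
    · omega

theorem scanR_stops (nums : List Int) (v : Int) :
    ∀ fuel a m, a ≤ m → m < a + fuel → (∀ k, a ≤ k → k < m → v < pvG nums k) →
      ¬ (v < pvG nums m) → scanR nums v a fuel = m := by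
  intro fuel
  induction fuel with
  | zero => intro a m h1 h2; omega
  | succ fuel ih =>
    intro a m h1 h2 hmid hm
    rcases Nat.lt_or_ge a m with h | h
    · have ha : v < pvG nums a := hmid a (le_refl a) h
      simp only [scanR, pvG] at ha ⊢
      rw [if_pos ha]
      exact ih (a + 1) m h (by omega) (fun k hk1 hk2 => hmid k (by omega) hk2) hm
    · have ham : a = m := by omega
      subst ham
      simp only [scanR, pvG] at hm ⊢
      rw [if_neg hm]

theorem scanR_ge (nums : List Int) (v : Int) :
    ∀ fuel a, a ≤ scanR nums v a fuel := by
  intro fuel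
  induction fuel with
  | zero => intro a; simp [scanR]
  | succ fuel ih =>
    intro a
    simp only [scanR]
    split
    · have := ih (a + 1); omega
    · omega

theorem scanR_mid (nums : List Int) (v : Int) :
    ∀ fuel a k, a ≤ k → k < scanR nums v a fuel → v < pvG nums k := by
  intro fuel
  induction fuel with
  | zero => intro a k h1 h2; simp [scanR] at h2; omega
  | succ fuel ih =>
    intro a k h1 h2
    simp only [scanR] at h2
    by_cases ha : v < pvIdx nums (a : Int)
    · rw [if_pos ha] at h2
      rcases Nat.eq_or_lt_of_le h1 with rfl | h
      · exact ha
      · exact ih (a + 1) k h h2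
    · rw [if_neg ha] at h2; omega

theorem scanR_stop_prop (nums : List Int) (v : Int) :
    ∀ fuel a, scanR nums v a fuel < a + fuel → ¬ (v < pvG nums (scanR nums v a fuel)) := by
  intro fuel
  induction fuel with
  | zero => intro a h; simp [scanR] at h
  | succ fuel ih =>
    intro a h
    simp only [scanR] at h ⊢
    by_cases ha : v < pvIdx nums (a : Int)
    · rw [if_pos ha] at h ⊢
      exact ih (a + 1) (by omega)
    · rw [if_neg ha] at h ⊢
      exact ha

theorem pvIdx_natCast (xs : List Int) (i : Nat) : pvIdx xs (i : Int) = xs.getD i 0 := by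
  simp [pvIdx, PySem.List.pyGet?_natCast, List.getD_eq_getElem?_getD]

theorem popA_eq (nums : List Int) (i : Nat) :
    ∀ s r, popA nums i s r =
      (s.dropWhile (fun (t : Nat) => decide (pvIdx nums (i : Int) ≤ pvIdx nums (t : Int))),
       (s.takeWhile (fun (t : Nat) => decide (pvIdx nums (i : Int) ≤ pvIdx nums (t : Int)))).foldl
         (fun (r : List Int) (t : Nat) => r.set t (i : Int)) r) := by
  intro s
  induction s with
  | nil => intro r; rfl
  | cons t s ih =>
    intro r
    by_cases h : pvIdx nums (i : Int) ≤ pvIdx nums (t : Int)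
    · simp only [popA, if_pos h, List.dropWhile, List.takeWhile, decide_eq_true h, List.foldl]
      exact ih (r.set t (i : Int))
    · simp only [popA, if_neg h, List.dropWhile, List.takeWhile, decide_eq_false h, List.foldl]

theorem foldl_set_getD (v : Int) :
    ∀ (P : List Nat) (r : List Int) (j : Nat), j < r.length →
      ((P.foldl (fun r t => r.set t v) r).getD j 0 =
        if j ∈ P then v else r.getD j 0) := by
  intro P
  induction P with
  | nil => intro r j _; simp
  | cons t P ih =>
    intro r j hj
    simp only [List.foldl, List.mem_cons]
    rw [ih (r.set t v) j (by simpa using hj)]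
    by_cases hjP : j ∈ P
    · simp [hjP]
    · by_cases hjt : j = t
      · subst hjt
        simp [hjP, List.getD_eq_getElem?_getD, List.getElem?_set_self (by omega)]
      · rw [if_neg hjP, if_neg (by simp [hjP, hjt])]
        rw [List.getD_eq_getElem?_getD, List.getD_eq_getElem?_getD, List.getElem?_set,
          if_neg (fun h => hjt h.symm)]

theorem invA_step (nums : List Int) (i : Nat) (hi : i < nums.length)
    (st : List Nat × List Int × List Int) (h : InvA nums i st) :
    InvA nums (i + 1) (stepA nums st i) := by
  obtain ⟨s, l, r⟩ := st
  obtain ⟨hsort, hmem, hllen, hrlen, hL, hR⟩ := h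
  simp only at hsort hmem hllen hrlen hL hR
  have hstA : stepA nums (s, l, r) i =
      (i :: s.dropWhile (fun (t : Nat) => decide (pvIdx nums (i : Int) ≤ pvIdx nums (t : Int))),
       (match s.dropWhile (fun (t : Nat) => decide (pvIdx nums (i : Int) ≤ pvIdx nums (t : Int))) with
        | [] => l
        | t0 :: _ => l.set i ((t0 : Nat) : Int)),
       (s.takeWhile (fun (t : Nat) => decide (pvIdx nums (i : Int) ≤ pvIdx nums (t : Int)))).foldl
         (fun (r : List Int) (t : Nat) => r.set t (i : Int)) r) := by
    simp only [stepA, popA_eq]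
  rw [hstA]
  set pfun : Nat → Bool := fun (t : Nat) => decide (pvIdx nums (i : Int) ≤ pvIdx nums (t : Int))
    with hpfun
  set P := s.takeWhile pfun with hPdef
  set K := s.dropWhile pfun with hKdef
  have hsplit : P ++ K = s := List.takeWhile_append_dropWhile
  have hPle : ∀ t ∈ P, pvG nums i ≤ pvG nums t := by
    intro t ht
    have := List.mem_takeWhile_imp ht
    simpa [hpfun, pvG, decide_eq_true_eq] using this
  have hmemS : ∀ t ∈ s, Vis nums i t := fun t ht => (hmem t).1 ht
  have hlt : ∀ t ∈ s, t < i := fun t ht => (hmemS t ht).1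
  have hKsub : K.Sublist s := List.dropWhile_sublist pfun
  have hKpair : K.Pairwise (· > ·) := hsort.sublist hKsub
  have hKfail : ∀ t ∈ K, pvG nums t < pvG nums i := by
    cases hKc : K with
    | nil => intro t ht; simp at ht
    | cons t0 tl =>
      have h0 := List.head?_dropWhile_not pfun s
      rw [← hKdef, hKc] at h0
      simp only [List.head?_cons] at h0
      have h0' : pvG nums t0 < pvG nums i := by
        simpa [hpfun, pvG, decide_eq_true_eq, not_le] using h0
      intro t ht
      rcases List.mem_cons.mp ht with rfl | htl
      · exact h0'
      · have ht0t : t0 > t := by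
          rw [hKc] at hKpair
          exact (List.pairwise_cons.mp hKpair).1 t htl
        have htS : t ∈ s := hKsub.subset (by rw [hKc]; exact List.mem_cons_of_mem _ htl)
        have ht0S : t0 ∈ s := hKsub.subset (by rw [hKc]; exact List.mem_cons_self ..)
        exact lt_trans ((hmemS t htS).2 t0 ht0t (hlt t0 ht0S)) h0'
  have hmemPK : ∀ j : Nat, j ∈ s ↔ (j ∈ P ∨ j ∈ K) := by
    intro j; rw [← hsplit]; exact List.mem_append
  -- gap lemma: between the new stack top and i, every value is ≥ nums[i]
  have hGap : ∀ b : Int, (∀ j : Nat, b < (j : Int) → j < i → Vis nums i j → j ∈ P) →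
      ∀ d j, i - j ≤ d → b < (j : Int) → j < i → pvG nums i ≤ pvG nums j := by
    intro b hb d
    induction d with
    | zero => intro j h1 _ h3; omega
    | succ d ih =>
      intro j h1 h2 h3
      by_cases hv : Vis nums i j
      · exact hPle j (hb j h2 h3 hv)
      · have hex : ∃ k, j < k ∧ k < i ∧ pvG nums k ≤ pvG nums j := by
          unfold Vis at hv
          push Not at hv
          obtain ⟨k, hk1, hk2, hk3⟩ := hv h3
          exact ⟨k, hk1, hk2, hk3⟩
        obtain ⟨k, hk1, hk2, hk3⟩ := hex
        have hbk : b < (k : Int) := lt_trans h2 (by exact_mod_cast hk1)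
        exact le_trans (ih k (by omega) hbk hk2) hk3
  -- popped indices have specR = i
  have hPspec : ∀ j ∈ P, specR nums j = i := by
    intro j hj
    have hjS : j ∈ s := (hmemPK j).mpr (Or.inl hj)
    have hVj := hmemS j hjS
    have hji : j < i := hVj.1
    have hjn : j < nums.length := lt_trans hji hi
    unfold specR
    refine scanR_stops nums (pvG nums j) (nums.length - (j + 1)) (j + 1) i
      (by omega) (by omega) ?_ (not_lt.mpr (hPle j hj))
    intro k hk1 hk2
    exact hVj.2 k (by omega) hk2
  -- surviving indices do not have specR = i
  have hNspec : ∀ j : Nat, j < nums.length → specR nums j = i → j ∈ P := by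
    intro j hjn hspec
    have h2 : (j + 1) + (nums.length - (j + 1)) = nums.length := by omega
    have hin : i < nums.length := hi
    have hge := scanR_ge nums (pvG nums j) (nums.length - (j + 1)) (j + 1)
    rw [show scanR nums (pvG nums j) (j + 1) (nums.length - (j + 1)) = specR nums j from rfl,
      hspec] at hge
    have hji : j < i := by omega
    have hstop := scanR_stop_prop nums (pvG nums j) (nums.length - (j + 1)) (j + 1)
      (by rw [show scanR nums (pvG nums j) (j + 1) (nums.length - (j + 1)) = specR nums j from rfl,
        hspec]; omega)
    rw [show scanR nums (pvG nums j) (j + 1) (nums.length - (j + 1)) = specR nums j from rfl,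
      hspec] at hstop
    have hgi : pvG nums i ≤ pvG nums j := not_lt.mp hstop
    have hVj : Vis nums i j := by
      refine ⟨hji, fun k hk1 hk2 => ?_⟩
      refine scanR_mid nums (pvG nums j) (nums.length - (j + 1)) (j + 1) k (by omega) ?_
      rw [show scanR nums (pvG nums j) (j + 1) (nums.length - (j + 1)) = specR nums j from rfl,
        hspec]
      exact hk2
    have hjS : j ∈ s := (hmem j).mpr hVj
    rcases (hmemPK j).mp hjS with hP | hK
    · exact hP
    · exact absurd (hKfail j hK) (not_lt.mpr hgi)
  have hfold_len : ∀ (Q : List Nat) (r0 : List Int),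
      (Q.foldl (fun (r : List Int) (t : Nat) => r.set t (i : Int)) r0).length = r0.length := by
    intro Q
    induction Q with
    | nil => intro r0; rfl
    | cons t Q ih => intro r0; rw [List.foldl_cons, ih, List.length_set]
  refine ⟨?_, ?_, ?_, ?_, ?_, ?_⟩
  · -- pairwise
    exact List.pairwise_cons.mpr ⟨fun t ht => hlt t (hKsub.subset ht), hKpair⟩
  · -- membership
    intro j
    simp only [List.mem_cons]
    constructor
    · rintro (rfl | hjK)
      · exact ⟨Nat.lt_succ_self j, fun k hk1 hk2 => by omega⟩
      · have hjS : j ∈ s := hKsub.subset hjK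
        have hVj := hmemS j hjS
        refine ⟨Nat.lt_succ_of_lt hVj.1, fun k hk1 hk2 => ?_⟩
        rcases Nat.lt_or_ge k i with hki | hki
        · exact hVj.2 k hk1 hki
        · have : k = i := by omega
          subst this
          exact hKfail j hjK
    · rintro ⟨hj1, hj2⟩
      rcases Nat.lt_or_ge j i with hji | hji
      · have hVj : Vis nums i j := ⟨hji, fun k hk1 hk2 => hj2 k hk1 (by omega)⟩
        have hjS : j ∈ s := (hmem j).mpr hVj
        rcases (hmemPK j).mp hjS with hP | hK
        · exfalso
          have := hj2 i hji (Nat.lt_succ_self i)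
          exact absurd this (not_lt.mpr (hPle j hP))
        · exact Or.inr hK
      · left; omega
  · -- l length
    cases K with
    | nil => exact hllen
    | cons t0 tl => simp [List.length_set, hllen]
  · -- r length
    rw [hfold_len, hrlen]
  · -- l entries
    intro j hj
    cases hKc : K with
    | nil =>
      simp only
      rw [hL j hj]
      rcases Nat.lt_trichotomy j i with hji | rfl | hji
      · rw [if_pos hji, if_pos (by omega)]
      · rw [if_neg (by omega), if_pos (by omega)]
        have hall : ∀ j' : Nat, j' < j → pvG nums j ≤ pvG nums j' := by
          intro j' hj'
          refine hGap (-1) ?_ j j' (by omega) (by omega) hj'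
          intro j'' _ hj''2 hv
          have := (hmem j'').mpr hv
          rcases (hmemPK j'').mp this with hP | hK
          · exact hP
          · rw [hKc] at hK; cases hK
        exact (scanL_none nums (pvG nums j) j (fun j' hj' => hall j' hj')).symm
      · rw [if_neg (by omega), if_neg (by omega)]
    | cons t0 tl =>
      have ht0K : t0 ∈ K := by rw [hKc]; exact List.mem_cons_self ..
      have ht0S : t0 ∈ s := hKsub.subset ht0K
      have ht0i : t0 < i := hlt t0 ht0S
      simp only
      rcases eq_or_ne j i with rfl | hne
      · rw [List.getD_eq_getElem?_getD, List.getElem?_set_self (by omega), Option.getD_some,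
          if_pos (by omega)]
        have hmid : ∀ j' : Nat, t0 < j' → j' < j → pvG nums j ≤ pvG nums j' := by
          intro j' h1 h2
          refine hGap (t0 : Int) ?_ j j' (by omega) (by exact_mod_cast h1) h2
          intro j'' hj''1 hj''2 hv
          have hj''S := (hmem j'').mpr hv
          rcases (hmemPK j'').mp hj''S with hP | hK
          · exact hP
          · exfalso
            rw [hKc] at hK
            rcases List.mem_cons.mp hK with rfl | htl
            · exact absurd hj''1 (by simp)
            · rw [hKc] at hKpair
              have := (List.pairwise_cons.mp hKpair).1 j'' htl
              have ht0j'' : (t0 : Int) < (j'' : Int) := hj''1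
              omega
        exact (scanL_first nums (pvG nums j) j t0 ht0i (hKfail t0 ht0K) hmid).symm
      · rw [List.getD_eq_getElem?_getD, List.getElem?_set_ne (fun hh => hne hh.symm),
          ← List.getD_eq_getElem?_getD, hL j hj]
        rcases Nat.lt_or_ge j i with hji | hji
        · rw [if_pos hji, if_pos (by omega)]
        · rw [if_neg (by omega), if_neg (by omega)]
  · -- r entries
    intro j hj
    simp only
    rw [foldl_set_getD (i : Int) P r j (by omega)]
    by_cases hjP : j ∈ P
    · rw [if_pos hjP, hPspec j hjP, if_pos (by omega)]
    · rw [if_neg hjP, hR j hj]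
      have hne : specR nums j ≠ i := fun hh => hjP (hNspec j hj hh)
      rcases Nat.lt_or_ge (specR nums j) i with hlt' | hge'
      · rw [if_pos hlt', if_pos (by omega)]
      · rw [if_neg (by omega), if_neg (by omega)]

theorem invA_final (nums : List Int) :
    InvA nums nums.length
      ((List.range nums.length).foldl (stepA nums)
        ([], List.replicate nums.length (-1), List.replicate nums.length (nums.length : Int))) := by
  have main : ∀ i, i ≤ nums.length → InvA nums i ((List.range i).foldl (stepA nums)
      ([], List.replicate nums.length (-1), List.replicate nums.length (nums.length : Int))) := by
    intro i
    induction i with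
    | zero =>
      intro _
      rw [List.range_zero, List.foldl_nil]
      refine ⟨List.Pairwise.nil, ?_, by simp, by simp, ?_, ?_⟩
      · intro j
        simp only [List.not_mem_nil, false_iff, Vis]
        intro hv; omega
      · intro j hj
        rw [if_neg (by omega)]
        simp [List.getD_eq_getElem?_getD, hj]
      · intro j hj
        rw [if_neg (by omega)]
        simp [List.getD_eq_getElem?_getD, hj]
    | succ i ih =>
      intro hle
      rw [List.range_succ, List.foldl_append, List.foldl_cons, List.foldl_nil]
      exact invA_step nums i (by omega) _ (ih (by omega))
  exact main nums.length (le_refl _)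

theorem preA_eq (nums : List Int) :
    preA nums = (List.range (nums.length + 1)).map (fun i => (nums.take i).sum) := by
  induction nums using List.reverseRecOn with
  | nil => rfl
  | append_singleton xs x ih =>
    rw [preA, List.foldl_append]
    have h1 : List.foldl (fun pre item => pre ++ [pvIdx pre (-1) + item]) [0] xs = preA xs := rfl
    rw [h1, ih]
    simp only [List.foldl_cons, List.foldl_nil]
    have hM : pvIdx ((List.range (xs.length + 1)).map (fun i => (xs.take i).sum)) (-1)
        = xs.sum := by
      rw [pvIdx, PySem.List.pyGet?_neg_one, List.getLast?_map]
      rw [List.range_succ]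
      simp [List.take_of_length_le]
    rw [hM]
    have hrange : List.range ((xs ++ [x]).length + 1)
        = List.range (xs.length + 1) ++ [xs.length + 1] := by
      simp [List.range_succ]
    rw [hrange, List.map_append]
    congr 1
    · refine List.map_eq_map_iff.mpr (fun i hi => ?_)
      rw [List.take_append_of_le_length (by simp at hi; omega)]
    · simp

-- ===== VERDICT (by name: the statement is the Claim_ definition above) =====
theorem maxSumMinProduct_spec : Claim_equal_maxSumMinProduct := by
  unfold Claim_equal_maxSumMinProduct Spec_maxSumMinProduct
  intro nums _
  obtain ⟨-, -, hllen, hrlen, hL, hR⟩ := invA_final nums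
  have hpre : preA nums = (List.range (nums.length + 1)).map
      (fun (i : Nat) => (PySem.List.slice nums none (some (i : Int))).sum) := by
    rw [preA_eq]
    refine List.map_eq_map_iff.mpr (fun i _ => ?_)
    rw [PySem.List.slice_to_natCast]
  simp only [maxSumMinProduct, maxSumMinProduct_alt]
  congr 1
  rw [← hpre]
  refine List.foldl_ext _ _ _ ?_
  intro acc i hi
  have hin : i < nums.length := List.mem_range.mp hi
  have hri : pvIdx ((List.range nums.length).foldl (stepA nums)
      ([], List.replicate nums.length (-1), List.replicate nums.length (nums.length : Int))).2.2
      (i : Int) = ((scanR nums (pvIdx nums (i : Int)) (i + 1) (nums.length - (i + 1))) : Int) := by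
    rw [pvIdx_natCast, hR i hin]
    have h1 := scanR_le nums (pvG nums i) (nums.length - (i + 1)) (i + 1)
    have h2 : (i + 1) + (nums.length - (i + 1)) = nums.length := by omega
    unfold specR at *
    simp only [pvG] at *
    split_ifs with h
    · rfl
    · congr 1; omega
  have hli : pvIdx ((List.range nums.length).foldl (stepA nums)
      ([], List.replicate nums.length (-1), List.replicate nums.length (nums.length : Int))).2.1
      (i : Int) = scanL nums (pvIdx nums (i : Int)) i := by
    rw [pvIdx_natCast, hL i hin, if_pos hin]
    simp only [pvG]
  rw [hri, hli]
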